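-- pv_equiv track=rewrite | github.com/nobe0716/problem_solving | codeforces/contests/1542/B. Plus and Multiply.py | solve
-- ===== SOURCE A (Python) =====
-- def solve(n, a, b):
--     k = 1
--     nmb = n % b
--     s = set()
--     while k <= n:
--         # k %= b
--         if k % b == nmb:
--             return True
--         elif k % b in s:
--             return False
--         s.add(k % b)
--         k *= a
--     return False
-- ===== SOURCE B (Python) =====
-- def solve(n, a, b):
--     # True iff some power a**i (checked while <= n, in order i = 0, 1, ...) is congruent to n mod b.
--     r = n % b
--     if n < 1:
--         return False
--     if -1 <= a <= 1:
--         # powers of a repeat after at most two values; check just those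
--         basis = [1] if a == 1 else ([1, 0] if a == 0 else [1, -1])
--         return any(p % b == r for p in basis)
--     p = 1
--     while p <= n:
--         if p % b == r:
--             return True
--         p *= a
--     return False
-- ===== Notes on version B (the rewrite author's own statement) =====
-- stated objective: simpler
-- what changed: A runs one uniform while-loop that maintains a set of residues seen so far and breaks on a repeated residue; B drops the set entirely: it splits on a upfront, testing the at-most-two distinct powers [1], [1,0] or [1,-1] directly when |a| <= 1, and for |a| >= 2 runs a bare multiply-and-test loop whose termination comes from the power magnitude exceeding n.
import Mathlib
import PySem

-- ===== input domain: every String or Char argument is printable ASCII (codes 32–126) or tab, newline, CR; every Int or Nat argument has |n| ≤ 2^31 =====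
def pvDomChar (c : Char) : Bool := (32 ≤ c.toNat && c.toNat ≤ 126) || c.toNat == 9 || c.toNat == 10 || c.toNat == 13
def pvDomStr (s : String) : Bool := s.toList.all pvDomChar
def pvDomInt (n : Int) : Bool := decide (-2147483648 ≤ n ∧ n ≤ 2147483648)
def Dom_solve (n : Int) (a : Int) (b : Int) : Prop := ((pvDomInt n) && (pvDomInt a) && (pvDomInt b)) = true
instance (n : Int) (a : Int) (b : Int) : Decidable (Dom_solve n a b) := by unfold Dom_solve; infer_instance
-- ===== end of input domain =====

-- B replaces A's residue-set cycle detection by an upfront case split on a (the |a| ≤ 1 powers are listed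
-- outright) and a bare multiply-and-test loop for |a| ≥ 2; objective: simpler (no set state is maintained).

-- ===== PORT A =====
-- A's while loop; the fuel only makes the recursion total (≤ ~70 iterations happen on Dom: the power
-- magnitudes double past n within 64 steps for |a| ≥ 2, and the residue set stops |a| ≤ 1 after ≤ 3 steps).
def solveALoop (n a b nmb : Int) (fuel : Nat) (k : Int) (s : PySem.Set Int) : Bool :=
  match fuel with
  | 0 => false
  | fuel + 1 =>
    if k ≤ n then
      if PySem.Int.mod k b = nmb then true
      else if PySem.Set.contains s (PySem.Int.mod k b) then false
      else solveALoop n a b nmb fuel (k * a) (PySem.Set.add s (PySem.Int.mod k b))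
    else false

def solve (n : Int) (a : Int) (b : Int) : Bool :=
  solveALoop n a b (PySem.Int.mod n b) 200 1 PySem.Set.empty

-- ===== PORT B =====
-- B's while loop for |a| ≥ 2 (fuel = totality guard only, as above)
def solveBLoop (n a b r : Int) (fuel : Nat) (p : Int) : Bool :=
  match fuel with
  | 0 => false
  | fuel + 1 =>
    if p ≤ n then
      if PySem.Int.mod p b = r then true
      else solveBLoop n a b r fuel (p * a)
    else false

def solve_alt (n : Int) (a : Int) (b : Int) : Bool :=
  let r := PySem.Int.mod n b
  if n < 1 then false
  else if -1 ≤ a ∧ a ≤ 1 then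
    (if a = 1 then [(1 : Int)] else if a = 0 then [1, 0] else [1, -1]).any
      (fun p => PySem.Int.mod p b == r)
  else solveBLoop n a b r 200 1

-- ===== PRECONDITION & SPEC =====
-- Pre_ excludes exactly b = 0, where Python A raises ZeroDivisionError at 'n % b'.
def Pre_solve (n : Int) (a : Int) (b : Int) : Prop := b ≠ 0
instance (n : Int) (a : Int) (b : Int) : Decidable (Pre_solve n a b) := by unfold Pre_solve; infer_instance
def pvWitness_solve : Int × Int × Int := (24, 3, 5)
def Spec_solve (n : Int) (a : Int) (b : Int) (out : Bool) : Prop := out = solve_alt n a b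
instance (n : Int) (a : Int) (b : Int) (out : Bool) : Decidable (Spec_solve n a b out) := by unfold Spec_solve; infer_instance

-- ===== CLAIM (what is proved, stated in full; the proofs are below) =====
def Claim_equal_solve : Prop := ∀ (n : Int) (a : Int) (b : Int), Dom_solve n a b → Pre_solve n a b → Spec_solve n a b (solve n a b)

-- ===== LEMMAS AND PROOFS =====

-- Python's % sends congruent numbers (mod b) to the same representative.
theorem pymod_congr {b x y : Int} (hb : b ≠ 0) (h : b ∣ x - y) :
    PySem.Int.mod x b = PySem.Int.mod y b := by
  have hx := PySem.Int.floordiv_mul_add_mod x b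
  have hy := PySem.Int.floordiv_mul_add_mod y b
  obtain ⟨c, hc⟩ := h
  have hd : PySem.Int.mod x b - PySem.Int.mod y b
      = b * (c - PySem.Int.floordiv x b + PySem.Int.floordiv y b) := by linear_combination hc + hx - hy
  have hdvd : b ∣ PySem.Int.mod x b - PySem.Int.mod y b := ⟨_, hd⟩
  have habs : (PySem.Int.mod x b - PySem.Int.mod y b).natAbs < b.natAbs := by
    rcases lt_or_gt_of_ne hb with hneg | hpos
    · have b1 := PySem.Int.mod_neg_bounds x hneg
      have b2 := PySem.Int.mod_neg_bounds y hneg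
      omega
    · have b1 := PySem.Int.mod_nonneg x hpos
      have b2 := PySem.Int.mod_lt x hpos
      have b3 := PySem.Int.mod_nonneg y hpos
      have b4 := PySem.Int.mod_lt y hpos
      omega
  have := Int.eq_zero_of_dvd_of_natAbs_lt_natAbs hdvd habs
  omega

-- stepping the power by a only depends on the current residue
theorem pymod_mul_right {b x y : Int} (a : Int) (hb : b ≠ 0)
    (h : b ∣ x - y) : PySem.Int.mod (x * a) b = PySem.Int.mod (y * a) b :=
  pymod_congr hb (by obtain ⟨c, hc⟩ := h; exact ⟨c * a, by linear_combination a * hc⟩)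

theorem pymod_sub_dvd (b x : Int) : b ∣ x - PySem.Int.mod x b :=
  ⟨PySem.Int.floordiv x b, by have := PySem.Int.floordiv_mul_add_mod x b; linarith⟩

-- the residue one multiplication ahead of k, rewritten through k's residue
theorem pymod_step (b k a : Int) (hb : b ≠ 0) :
    PySem.Int.mod (k * a) b = PySem.Int.mod (PySem.Int.mod k b * a) b :=
  pymod_mul_right a hb (pymod_sub_dvd b k)

-- if the residues reachable from p stay inside a set of known non-matching residues, B's loop fails
theorem solveBLoop_false (n a b r : Int) (hb : b ≠ 0) (s : List Int)
    (hne : ∀ x ∈ s, x ≠ r) (hcl : ∀ x ∈ s, PySem.Int.mod (x * a) b ∈ s) :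
    ∀ (fuel : Nat) (p : Int), PySem.Int.mod p b ∈ s → solveBLoop n a b r fuel p = false := by
  intro fuel
  induction fuel with
  | zero => intro p _; rfl
  | succ fuel ih =>
    intro p hp
    simp only [solveBLoop]
    split
    · rw [if_neg (hne _ hp)]
      apply ih
      rw [pymod_step b p a hb]
      exact hcl _ hp
    · rfl

-- the synchronised loops: A's loop with its residue set equals B's bare loop
theorem loopA_eq_loopB (n a b r : Int) (hb : b ≠ 0) :
    ∀ (fuel : Nat) (k : Int) (s : PySem.Set Int),
      (∀ x ∈ s, x ≠ r) →
      (∀ x ∈ s, PySem.Int.mod (x * a) b ∈ s ∨ PySem.Int.mod (x * a) b = PySem.Int.mod k b) →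
      solveALoop n a b r fuel k s = solveBLoop n a b r fuel k := by
  intro fuel
  induction fuel with
  | zero => intro k s _ _; rfl
  | succ fuel ih =>
    intro k s hne hcl
    simp only [solveALoop, solveBLoop]
    by_cases hk : k ≤ n
    · rw [if_pos hk, if_pos hk]
      by_cases hm : PySem.Int.mod k b = r
      · rw [if_pos hm, if_pos hm]
      · rw [if_neg hm, if_neg hm]
        by_cases hmem : PySem.Set.contains s (PySem.Int.mod k b) = true
        · rw [if_pos hmem]
          have hks : PySem.Int.mod k b ∈ s := (PySem.Set.contains_iff s _).mp hmem
          have hclosed : ∀ x ∈ s, PySem.Int.mod (x * a) b ∈ s := by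
            intro x hx
            rcases hcl x hx with h | h
            · exact h
            · rw [h]; exact hks
          refine (solveBLoop_false n a b r hb s hne hclosed fuel (k * a) ?_).symm
          rw [pymod_step b k a hb]
          exact hclosed _ hks
        · rw [if_neg hmem]
          have hnm : PySem.Int.mod k b ∉ s := fun h => hmem ((PySem.Set.contains_iff s _).mpr h)
          have hadd : PySem.Set.add s (PySem.Int.mod k b) = s ++ [PySem.Int.mod k b] := by
            simp [PySem.Set.add, hnm]
          rw [hadd]
          apply ih
          · intro x hx
            rcases List.mem_append.mp hx with h | h
            · exact hne x h
            · rw [List.mem_singleton.mp h]; exact hm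
          · intro x hx
            rcases List.mem_append.mp hx with h | h
            · rcases hcl x h with h2 | h2
              · exact Or.inl (List.mem_append.mpr (Or.inl h2))
              · exact Or.inl (List.mem_append.mpr (Or.inr (by simp [h2])))
            · rw [List.mem_singleton.mp h]
              exact Or.inr (pymod_step b k a hb).symm
    · rw [if_neg hk, if_neg hk]

theorem solveBLoop_succ (n a b r : Int) (fuel : Nat) (p : Int) :
    solveBLoop n a b r (fuel + 1) p
      = if p ≤ n then (if PySem.Int.mod p b = r then true else solveBLoop n a b r fuel (p * a)) else false := rfl

-- solve, rewritten through the synchronised-loop lemma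
theorem solve_eq_loopB (n a b : Int) (hb : b ≠ 0) :
    solve n a b = solveBLoop n a b (PySem.Int.mod n b) 200 1 := by
  have h := loopA_eq_loopB n a b (PySem.Int.mod n b) hb 200 1 PySem.Set.empty
    (by intro x hx; simp [PySem.Set.empty] at hx) (by intro x hx; simp [PySem.Set.empty] at hx)
  simpa [solve] using h

-- ===== VERDICT (by name: the statement is the Claim_ definition above) =====
theorem solve_spec : Claim_equal_solve := by
  intro n a b _ hb
  show solve n a b = solve_alt n a b
  rw [solve_eq_loopB n a b hb]
  by_cases hn : n < 1
  · rw [show (200 : Nat) = 199 + 1 from rfl, solveBLoop_succ, if_neg (by omega)]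
    simp [solve_alt, hn]
  · have h1n : (1 : Int) ≤ n := by omega
    by_cases ha1 : a = 1
    · subst ha1
      by_cases hm : PySem.Int.mod 1 b = PySem.Int.mod n b
      · rw [show (200 : Nat) = 199 + 1 from rfl, solveBLoop_succ, if_pos h1n, if_pos hm]
        simp [solve_alt, hn, hm]
      · rw [solveBLoop_false n 1 b (PySem.Int.mod n b) hb [PySem.Int.mod 1 b]
          (by simpa using hm)
          (by intro x hx; rw [List.mem_singleton.mp hx]; simpa using (pymod_step b 1 1 hb).symm)
          200 1 (by simp)]
        simp [solve_alt, hn, hm]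
    · by_cases ha0 : a = 0
      · subst ha0
        by_cases hm : PySem.Int.mod 1 b = PySem.Int.mod n b
        · rw [show (200 : Nat) = 199 + 1 from rfl, solveBLoop_succ, if_pos h1n, if_pos hm]
          simp [solve_alt, hn, hm]
        · by_cases hm0 : PySem.Int.mod 0 b = PySem.Int.mod n b
          · rw [show (200 : Nat) = 199 + 1 from rfl, solveBLoop_succ, if_pos h1n, if_neg hm,
              show (199 : Nat) = 198 + 1 from rfl, solveBLoop_succ]
            rw [show (1 : Int) * 0 = 0 from rfl, if_pos (by omega : (0 : Int) ≤ n), if_pos hm0]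
            simp [solve_alt, hn, hm0]
          · rw [solveBLoop_false n 0 b (PySem.Int.mod n b) hb [PySem.Int.mod 1 b, PySem.Int.mod 0 b]
              (by intro x hx; fin_cases hx <;> simp_all)
              (by intro x hx; fin_cases hx <;> · simp only [mul_zero]; simp)
              200 1 (by simp)]
            simp [solve_alt, hn, hm, hm0]
      · by_cases ham : a = -1
        · subst ham
          by_cases hm : PySem.Int.mod 1 b = PySem.Int.mod n b
          · rw [show (200 : Nat) = 199 + 1 from rfl, solveBLoop_succ, if_pos h1n, if_pos hm]
            simp [solve_alt, hn, hm]
          · by_cases hmm : PySem.Int.mod (-1) b = PySem.Int.mod n b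
            · rw [show (200 : Nat) = 199 + 1 from rfl, solveBLoop_succ, if_pos h1n, if_neg hm,
                show (199 : Nat) = 198 + 1 from rfl, solveBLoop_succ]
              rw [show (1 : Int) * (-1) = -1 from rfl, if_pos (by omega : (-1 : Int) ≤ n), if_pos hmm]
              simp [solve_alt, hn, hm, hmm]
            · rw [solveBLoop_false n (-1) b (PySem.Int.mod n b) hb
                [PySem.Int.mod 1 b, PySem.Int.mod (-1) b]
                (by intro x hx; fin_cases hx <;> simp_all)
                (by intro x hx
                    fin_cases hx
                    · have := (pymod_step b 1 (-1) hb).symm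
                      simp only [mul_neg_one] at this ⊢
                      simp [this]
                    · have := (pymod_step b (-1) (-1) hb).symm
                      simp only [mul_neg_one, neg_neg] at this ⊢
                      simp [this])
                200 1 (by simp)]
              simp [solve_alt, hn, hm, hmm]
        · have hbig : ¬(-1 ≤ a ∧ a ≤ 1) := by omega
          simp [solve_alt, hn, hbig]
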